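-- pv_equiv track=rewrite | github.com/MrBrantCode/unitest_baseline | mut_generate/mist_train_taco/taco_5306/solution.py | restore_segment_tree
-- ===== SOURCE A (Python) =====
-- from bisect import bisect_right
--
-- def restore_segment_tree(n, shuffled_values):
--     nl = 0
--     x = n
--     while x:
--         nl += 1
--         x >>= 1
--
--     occ = {}
--     for e in shuffled_values:
--         if e not in occ:
--             occ[e] = 0
--         occ[e] += 1
--
--     cnt_occ = {}
--     for v in occ.values():
--         if v not in cnt_occ:
--             cnt_occ[v] = 0
--         cnt_occ[v] += 1
--
--     for i in range(1, nl):
--         if i not in cnt_occ or cnt_occ[i] != 1 << (nl - 1 - i):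
--             return "NO", []
--
--     ah = [[] for _ in range(nl + 2)]
--     for i, v in occ.items():
--         ah[v].append(i)
--
--     sofar = ah[nl]
--     res = list(sofar)
--
--     for i in range(1, nl):
--         sofar = z(sofar, ah[nl - i])
--         res += sofar
--
--     return "YES", res
--
-- def z(a, b):
--     B = sorted(b)
--     r = []
--     for i in range(len(a)):
--         ind = bisect_right(B, a[i])
--         r += [a[i], B[ind]]
--         del B[ind]
--     return r
-- ===== SOURCE B (Python) =====
-- def restore_segment_tree(n, shuffled_values):
--     nl = 0
--     x = n
--     while x > 0:
--         nl += 1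
--         x //= 2
--
--     occ = {}
--     for e in shuffled_values:
--         occ[e] = occ.get(e, 0) + 1
--
--     for i in range(1, nl):
--         c = 0
--         for v in occ.values():
--             if v == i:
--                 c += 1
--         if c != 1 << (nl - 1 - i):
--             return "NO", []
--
--     buckets = {}
--     for val, c in occ.items():
--         buckets[c] = buckets.get(c, []) + [val]
--
--     front = list(buckets.get(nl, []))
--     res = list(front)
--     for i in range(1, nl):
--         out = match_level(front, buckets.get(nl - i, []))
--         if out is None:
--             return "NO", []
--         front = out
--         res += out
--     return "YES", res
--
--
-- def match_level(front, kids):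
--     rem = list(kids)
--     out = []
--     for p in front:
--         cand = [x for x in rem if x > p]
--         if not cand:
--             return None
--         q = min(cand)
--         rem.remove(q)
--         out += [p, q]
--     return out
-- ===== Notes on version B (the rewrite author's own statement) =====
-- stated objective: alternative
-- what changed: B matches each level greedily by scanning the unsorted remaining children for the minimum strictly-greater one (and returns ('NO',[]) when none exists) instead of A's sort+bisect_right+delete, validates multiplicity counts by direct counting over the occurrence dict instead of building a second counting dict, and groups values by multiplicity in a dict instead of an index-addressed list of lists.
import Mathlib
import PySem

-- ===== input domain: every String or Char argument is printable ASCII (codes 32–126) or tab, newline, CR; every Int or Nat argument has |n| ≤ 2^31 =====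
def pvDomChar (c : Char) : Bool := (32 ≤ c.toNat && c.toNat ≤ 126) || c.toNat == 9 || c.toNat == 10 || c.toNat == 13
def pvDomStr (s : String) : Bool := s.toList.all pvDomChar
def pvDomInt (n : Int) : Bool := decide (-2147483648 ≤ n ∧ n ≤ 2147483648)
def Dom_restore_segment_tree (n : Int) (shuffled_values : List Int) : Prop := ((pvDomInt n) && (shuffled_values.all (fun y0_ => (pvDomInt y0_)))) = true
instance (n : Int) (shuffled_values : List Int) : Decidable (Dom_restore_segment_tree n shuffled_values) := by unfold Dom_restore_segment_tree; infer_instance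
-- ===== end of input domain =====

-- B re-implements the per-level greedy by scanning for the minimum strictly-greater remaining child
-- instead of A's sort+bisect+delete, checks validity by direct counting instead of a second counting
-- dict, and groups levels in a dict keyed by multiplicity instead of an index-addressed list of lists
-- (objective: alternative; equivalence is about the return value only).

-- ===== PORT A =====

/-- A's `while x: nl += 1; x >>= 1` on n.toNat (for n < 0 the Python loop never terminates;
    Pre_ requires 0 ≤ n, where this is exact). -/
def pvBitLenGo : Nat → Nat → Nat
  | 0, _ => 0
  | _, 0 => 0
  | fuel + 1, x => pvBitLenGo fuel (x / 2) + 1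

def pvBitLen (x : Nat) : Nat := pvBitLenGo x x

/-- one iteration of the loop in A's `z`: `ind = bisect_right(B, a[i]); r += [a[i], B[ind]]; del B[ind]`
    (B[ind] / del with ind = len(B) raise IndexError in Python — excluded by Pre_). -/
def pvZStep (st : List Int × List Int) (ai : Int) : List Int × List Int :=
  let ind := PySem.List.bisectRight st.1 ai
  (st.1.eraseIdx ind, st.2 ++ [ai, PySem.List.pyGetD st.1 (ind : Int) 0])

/-- A's `z(a, b)` -/
def pvZ (a b : List Int) : List Int :=
  ((PySem.List.pyRange 0 (PySem.List.len a) 1).foldl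
      (fun st i => pvZStep st (PySem.List.pyGetD a i 0))
      (PySem.List.sorted b (fun x => x), [])).2

def restore_segment_tree (n : Int) (shuffled_values : List Int) : String × List Int :=
  let nlN := pvBitLen n.toNat
  let nl : Int := (nlN : Int)
  let occ : PySem.Dict Int Int :=
    shuffled_values.foldl
      (fun d e => (if d.contains e = false then d.insert e 0 else d).modify e 0 (· + 1))
      PySem.Dict.empty
  let cnt_occ : PySem.Dict Int Int :=
    occ.values.foldl
      (fun d v => (if d.contains v = false then d.insert v 0 else d).modify v 0 (· + 1))
      PySem.Dict.empty
  match (PySem.List.pyRange 1 nl 1).find?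
      (fun i => !(cnt_occ.contains i) || !(cnt_occ.getD i 0 == (1 : Int) <<< (nl - 1 - i).toNat)) with
  | some _ => ("NO", [])
  | none =>
    let ah : List (List Int) :=
      occ.items.foldl
        (fun ah p => PySem.List.pySetD ah p.2 (PySem.List.pyGetD ah p.2 [] ++ [p.1]))
        (List.replicate (nlN + 2) [])
    let sofar := PySem.List.pyGetD ah nl []
    let st := (PySem.List.pyRange 1 nl 1).foldl
      (fun (st : List Int × List Int) i =>
        let s := pvZ st.1 (PySem.List.pyGetD ah (nl - i) [])
        (s, st.2 ++ s)) (sofar, sofar)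
    ("YES", st.2)

-- ===== PORT B =====

/-- B's match_level loop: for each parent scan the remaining children for the minimum
    strictly greater one; None when there is none. -/
def pvMatchGo : List Int → List Int → List Int → Option (List Int)
  | [], _, out => some out
  | p :: f, rem, out =>
    let cand := rem.filter (fun x => p < x)
    match PySem.List.min? cand (fun x => x) with
    | none => none
    | some q =>
      match PySem.List.remove? rem q with
      | none => none  -- unreachable: q ∈ cand ⊆ rem, so list.remove cannot raise
      | some rem' => pvMatchGo f rem' (out ++ [p, q])

def pvMatchLevel (front kids : List Int) : Option (List Int) :=
  pvMatchGo front kids []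

/-- B's main level loop with its early "NO" return. -/
def pvBGo : List Int → PySem.Dict Int (List Int) → Int → List Int → List Int → String × List Int
  | [], _, _, _, res => ("YES", res)
  | i :: is, buckets, nl, front, res =>
    match pvMatchLevel front (buckets.getD (nl - i) []) with
    | none => ("NO", [])
    | some out => pvBGo is buckets nl out (res ++ out)

def restore_segment_tree_alt (n : Int) (shuffled_values : List Int) : String × List Int :=
  let nl : Int := (pvBitLen n.toNat : Int)
  let occ : PySem.Dict Int Int :=
    shuffled_values.foldl (fun d e => d.insert e (d.getD e 0 + 1)) PySem.Dict.empty
  match (PySem.List.pyRange 1 nl 1).find?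
      (fun i => !(occ.values.foldl (fun c v => if v == i then c + 1 else c) (0 : Int)
                    == (1 : Int) <<< (nl - 1 - i).toNat)) with
  | some _ => ("NO", [])
  | none =>
    let buckets : PySem.Dict Int (List Int) :=
      occ.items.foldl (fun d p => d.insert p.2 (d.getD p.2 [] ++ [p.1])) PySem.Dict.empty
    let front := buckets.getD nl []
    pvBGo (PySem.List.pyRange 1 nl 1) buckets nl front front

-- ===== PRECONDITION & SPEC =====

/-- bit_length of n (= A's nl for 0 ≤ n). -/
def pvNl (n : Int) : Int := (PySem.Int.bitLength n : Int)

/-- the distinct values of multiplicity j, in first-appearance order. -/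
def pvBucket (xs : List Int) (j : Int) : List Int :=
  (PySem.List.dedup xs).filter (fun v => (xs.count v : Int) == j)

/-- the distinct values of multiplicity nl-i+1 .. nl (the parents entering level step i). -/
def pvAccum (n : Int) (xs : List Int) (i : Int) : List Int :=
  (PySem.List.dedup xs).filter
    (fun v => decide (pvNl n - i + 1 ≤ (xs.count v : Int)) && decide ((xs.count v : Int) ≤ pvNl n))

/-- the level-count check A performs (count of values of multiplicity i is 2^(nl-1-i)). -/
def pvChecksb (n : Int) (xs : List Int) : Bool :=
  (PySem.List.pyRange 1 (pvNl n) 1).all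
    (fun i => ((pvBucket xs i).length : Int) == (1 : Int) <<< (pvNl n - 1 - i).toNat)

/-- equal lengths and strictly pointwise-increasing after sorting. -/
def pvPointwiseb (sa sb : List Int) : Bool :=
  sa.length == sb.length && (sa.zip sb).all (fun p => decide (p.1 < p.2))

/-- every level admits the strictly-increasing perfect matching the greedy needs. -/
def pvPWb (n : Int) (xs : List Int) : Bool :=
  (PySem.List.pyRange 1 (pvNl n) 1).all
    (fun i => pvPointwiseb (PySem.List.sorted (pvAccum n xs i) (fun x => x))
                           (PySem.List.sorted (pvBucket xs (pvNl n - i)) (fun x => x)))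

/-- the inputs (past the count check) on which A completes without an IndexError. -/
def pvSafeb (n : Int) (xs : List Int) : Bool :=
  xs.all (fun v => decide ((xs.count v : Int) ≤ pvNl n + 1)) &&
  (decide (pvNl n ≤ 1) || (pvBucket xs (pvNl n)).length == 0 ||
    ((pvBucket xs (pvNl n)).length == 1 && pvPWb n xs))

-- Pre_ excludes n < 0 (A's bit-length loop never terminates there) and the inputs where A raises
-- IndexError: those that pass the per-multiplicity count check while either some value's
-- multiplicity exceeds nl+1 (ah[v] out of range) or the level-by-level strictly-increasing
-- matching is impossible (B[ind] out of range inside z).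
def Pre_restore_segment_tree (n : Int) (shuffled_values : List Int) : Prop :=
  0 ≤ n ∧ (!(pvChecksb n shuffled_values) || pvSafeb n shuffled_values) = true

instance (n : Int) (shuffled_values : List Int) : Decidable (Pre_restore_segment_tree n shuffled_values) := by
  unfold Pre_restore_segment_tree; infer_instance

def pvWitness_restore_segment_tree : Int × List Int := (3, [1, 1, 2])

def Spec_restore_segment_tree (n : Int) (shuffled_values : List Int) (out : String × List Int) : Prop := out = restore_segment_tree_alt n shuffled_values
instance (n : Int) (shuffled_values : List Int) (out : String × List Int) : Decidable (Spec_restore_segment_tree n shuffled_values out) := by unfold Spec_restore_segment_tree; infer_instance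

-- ===== CLAIM (what is proved, stated in full; the proofs are below) =====
def Claim_equal_restore_segment_tree : Prop := ∀ (n : Int) (shuffled_values : List Int), Dom_restore_segment_tree n shuffled_values → Pre_restore_segment_tree n shuffled_values → Spec_restore_segment_tree n shuffled_values (restore_segment_tree n shuffled_values)


-- ===== LEMMAS AND PROOFS =====

theorem pvBitLenGo_eq (fuel m : Nat) (h : m ≤ fuel) :
    pvBitLenGo fuel m = PySem.Int.bitLength (m : Int) := by
  induction fuel generalizing m with
  | zero =>
    interval_cases m
    simp [pvBitLenGo, PySem.Int.bitLength_zero]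
  | succ fuel ih =>
    cases m with
    | zero => simp [pvBitLenGo, PySem.Int.bitLength_zero]
    | succ k =>
      rw [pvBitLenGo, ih ((k+1)/2) (by omega), PySem.Int.bitLength_natCast (m := k+1) (by omega)]
      omega

theorem pvBitLen_eq (m : Nat) : pvBitLen m = PySem.Int.bitLength (m : Int) :=
  pvBitLenGo_eq m m le_rfl

theorem pvCounter_step (d : PySem.Dict Int Int) (e : Int) :
    (if d.contains e = false then d.insert e 0 else d).modify e 0 (· + 1)
      = d.insert e (d.getD e 0 + 1) := by
  by_cases h : d.contains e = true
  · simp [h, PySem.Dict.modify]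
  · have h' : d.contains e = false := by simpa using h
    rw [if_pos h']
    simp [PySem.Dict.modify, PySem.Dict.getD_insert_self, PySem.Dict.insert_insert_self,
      PySem.Dict.getD_of_not_contains _ _ h']

theorem pvCounter_fold (xs : List Int) :
    xs.foldl (fun d e => (if d.contains e = false then d.insert e 0 else d).modify e 0 (· + 1))
        PySem.Dict.empty = PySem.Dict.counter xs := by
  rw [PySem.List.foldl_congr_mem _ _ (fun d e => d.modify e 0 (· + 1)) _
      (fun acc x _ => pvCounter_step acc x)]
  rfl

theorem pvFind?_congr {α : Type} (l : List α) (p q : α → Bool)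
    (h : ∀ x ∈ l, p x = q x) : l.find? p = l.find? q := by
  induction l with
  | nil => rfl
  | cons x t ih =>
    simp only [List.find?_cons]
    rw [h x (by simp)]
    cases q x
    · exact ih (fun y hy => h y (by simp [hy]))
    · rfl

theorem pvValues_counter (xs : List Int) :
    (PySem.Dict.counter xs).values
      = (PySem.List.dedup xs).map (fun k => (xs.count k : Int)) := by
  rw [PySem.Dict.values_eq_map_keys _ (PySem.Dict.nodup_keys_counter xs) 0,
    PySem.Dict.keys_counter]
  simp only [PySem.List.dedup_eq_ofList]
  exact List.map_congr_left (fun k _ => PySem.Dict.getD_counter xs k)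

theorem pvCount_values (xs : List Int) (i : Int) :
    (PySem.Dict.counter xs).values.count i = (pvBucket xs i).length := by
  rw [pvValues_counter, List.count_eq_countP, List.countP_map, pvBucket,
    ← List.countP_eq_length_filter]
  rfl

theorem pvCheckPredA (vs : List Int) (i t : Int) (ht : t ≠ 0) :
    (!((PySem.Dict.counter vs).contains i) || !((PySem.Dict.counter vs).getD i 0 == t))
      = !((vs.count i : Int) == t) := by
  rw [PySem.Dict.contains_counter, PySem.Dict.getD_counter]
  by_cases h : i ∈ vs
  · simp [h]
  · have hc : vs.count i = 0 := List.count_eq_zero.mpr h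
    simp [h, hc, Ne.symm ht]

theorem pvCheckPredB (vs : List Int) (i t : Int) :
    (!(vs.foldl (fun c v => if v == i then c + 1 else c) (0 : Int) == t))
      = !((vs.count i : Int) == t) := by
  rw [PySem.List.foldl_count_if (fun v => v == i) vs 0, List.count_eq_countP]
  simp

theorem pvShift_ne_zero (k : Nat) : (1 : Int) <<< k ≠ 0 := by
  rw [Int.shiftLeft_eq]; positivity

theorem pvBucketsFold_getD (l : List (Int × Int)) (d : PySem.Dict Int (List Int)) (c : Int) :
    (l.foldl (fun d p => d.insert p.2 (d.getD p.2 [] ++ [p.1])) d).getD c []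
      = d.getD c [] ++ (l.filter (fun p => p.2 == c)).map (·.1) := by
  induction l generalizing d with
  | nil => simp
  | cons p t ih =>
    rw [List.foldl_cons, ih]
    by_cases h : p.2 = c
    · subst h
      simp [PySem.Dict.getD_insert_self]
    · rw [PySem.Dict.getD_insert_of_ne _ _ _ (Ne.symm h)]
      simp [h]

theorem pvAhFold_getD (l : List (Int × Int)) (ah : List (List Int)) (j : Nat)
    (hj : j < ah.length) (hall : ∀ p ∈ l, 0 ≤ p.2 ∧ p.2 < (ah.length : Int)) :
    PySem.List.pyGetD (l.foldl
        (fun ah p => PySem.List.pySetD ah p.2 (PySem.List.pyGetD ah p.2 [] ++ [p.1])) ah)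
        (j : Int) []
      = PySem.List.pyGetD ah (j : Int) [] ++ (l.filter (fun p => p.2 == (j : Int))).map (·.1) := by
  induction l generalizing ah with
  | nil => simp
  | cons p t ih =>
    have hp := hall p (by simp)
    have hlen : (PySem.List.pySetD ah p.2 (PySem.List.pyGetD ah p.2 [] ++ [p.1])).length
        = ah.length := PySem.List.length_pySetD ..
    rw [List.foldl_cons, ih _ (by omega) (fun q hq => by rw [hlen]; exact hall q (by simp [hq]))]
    rw [PySem.List.pySetD_of_nonneg _ _ hp.1]
    by_cases h : p.2 = (j : Int)
    · have hjt : p.2.toNat = j := by omega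
      rw [List.filter_cons_of_pos (by simpa using h), hjt]
      simp only [PySem.List.pyGetD_natCast, List.map_cons]
      rw [List.getD_eq_getElem?_getD, List.getElem?_set_self (by omega),
        List.getD_eq_getElem?_getD, List.getElem?_eq_getElem hj]
      rw [h]
      simp [List.getD_eq_getElem?_getD, List.getElem?_eq_getElem hj]
    · rw [List.filter_cons_of_neg (by simpa using h)]
      have : p.2.toNat ≠ j := by omega
      simp only [PySem.List.pyGetD_natCast]
      rw [List.getD_eq_getElem?_getD, List.getElem?_set_ne this, ← List.getD_eq_getElem?_getD]

theorem pvItemsFilter (xs : List Int) (j : Int) :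
    (((PySem.Dict.counter xs).items.filter (fun p => p.2 == j)).map (·.1)) = pvBucket xs j := by
  rw [PySem.Dict.items_counter, List.filter_map, List.map_map, pvBucket]
  simp only [PySem.List.dedup_eq_ofList, Function.comp_def]
  simp

theorem pvGetD_replicate (m j : Nat) :
    PySem.List.pyGetD (List.replicate m ([] : List Int)) (j : Int) [] = [] := by
  simp only [PySem.List.pyGetD_natCast]
  rw [List.getD_eq_getElem?_getD]
  rcases Nat.lt_or_ge j m with h | h
  · rw [List.getElem?_eq_getElem (by simpa using h)]
    simp
  · rw [List.getElem?_eq_none (by simpa using h)]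
    rfl

theorem pvFirstIdx {l : List Int} {q : Int} (h : q ∈ l) :
    ∃ k, ∃ hk : k < l.length, l[k] = q ∧ (∀ j (_ : j < l.length), j < k → l[j] ≠ q)
      ∧ l.erase q = l.eraseIdx k := by
  induction l with
  | nil => cases h
  | cons x t ih =>
    by_cases hx : x = q
    · refine ⟨0, by simp, by simpa using hx, by omega, by simp [hx]⟩
    · have ht : q ∈ t := by
        rcases List.mem_cons.mp h with h' | h'
        · exact absurd h'.symm hx
        · exact h'
      obtain ⟨k, hk, hkq, hbef, her⟩ := ih ht
      refine ⟨k + 1, by simpa using Nat.succ_lt_succ hk, by simpa using hkq, ?_, ?_⟩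
      · intro j hj hjk
        cases j with
        | zero => simpa using hx
        | succ j' => simpa using hbef j' (by simpa using hj) (by omega)
      · rw [List.erase_cons_tail (by simpa using hx), her, List.eraseIdx_cons_succ]

theorem pvExchange {sa sb : List Int} (hsb : sb.Pairwise (· ≤ ·))
    (h : List.Forall₂ (· < ·) sa sb) {k t : Nat} (hkt : k ≤ t) (ht : t < sa.length) :
    List.Forall₂ (· < ·) (sa.eraseIdx t) (sb.eraseIdx k) := by
  have hlen := h.length_eq
  have hget := (List.forall₂_iff_get.mp h).2
  have hk : k < sb.length := by omega
  rw [List.forall₂_iff_get]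
  constructor
  · rw [List.length_eraseIdx_of_lt ht, List.length_eraseIdx_of_lt hk]; omega
  · intro i h1 h2
    rw [List.length_eraseIdx_of_lt ht] at h1
    rw [List.length_eraseIdx_of_lt hk] at h2
    simp only [List.get_eq_getElem, List.getElem_eraseIdx]
    split_ifs with hit hik hik
    · exact hget i (by omega) (by omega)
    · exact lt_of_lt_of_le (hget i (by omega) (by omega))
        (List.pairwise_iff_getElem.mp hsb i (i+1) (by omega) (by omega) (by omega))
    · omega
    · exact hget (i+1) (by omega) (by omega)

theorem pvSortedErase {rem : List Int} {q : Int} (h : q ∈ rem) :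
    PySem.List.sorted (rem.erase q) (fun x => x)
      = (PySem.List.sorted rem (fun x => x)).erase q := by
  apply PySem.List.sorted_id_eq_of_perm_of_pairwise
  · exact ((PySem.List.sorted_perm rem (fun x => x) false).erase q)
  · exact List.Pairwise.sublist List.erase_sublist (PySem.List.sorted_pairwise rem (fun x => x))

theorem pvSortedTail (p : Int) (f : List Int) :
    PySem.List.sorted f (fun x => x)
      = (PySem.List.sorted (p :: f) (fun x => x)).erase p := by
  apply PySem.List.sorted_id_eq_of_perm_of_pairwise
  · exact ((PySem.List.sorted_perm (p :: f) (fun x => x) false).erase p).trans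
      (by rw [List.erase_cons_head])
  · exact List.Pairwise.sublist List.erase_sublist (PySem.List.sorted_pairwise (p :: f) (fun x => x))

theorem pvZGo (f : List Int) : ∀ (rem r out : List Int),
    List.Forall₂ (· < ·) (PySem.List.sorted f (fun x => x)) (PySem.List.sorted rem (fun x => x)) →
    ∃ w, (f.foldl (fun st ai => pvZStep st ai) (PySem.List.sorted rem (fun x => x), r)).2 = r ++ w
      ∧ pvMatchGo f rem out = some (out ++ w)
      ∧ w.Perm (f ++ rem) := by
  induction f with
  | nil =>
    intro rem r out h
    have hs : PySem.List.sorted rem (fun x => x) = [] := by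
      cases hE : PySem.List.sorted rem (fun x => x)
      · rfl
      · rw [hE] at h; cases h
    have hrem : rem = [] := (PySem.List.sorted_eq_nil_iff ..).mp hs
    refine ⟨[], by simp, by simp [pvMatchGo], by simp [hrem]⟩
  | cons p f' ih =>
    intro rem r out h
    have hlen := h.length_eq
    have hp : p ∈ PySem.List.sorted (p :: f') (fun x => x) := by
      rw [PySem.List.mem_sorted]; exact List.mem_cons_self ..
    obtain ⟨t, ht, hat, hbeforeA, heraseA⟩ := pvFirstIdx hp
    have htb : t < (PySem.List.sorted rem (fun x => x)).length := by omega
    have hx : p < (PySem.List.sorted rem (fun x => x))[t] := by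
      have := (List.forall₂_iff_get.mp h).2 t ht htb
      simpa [hat] using this
    have hxrem : (PySem.List.sorted rem (fun x => x))[t] ∈ rem := by
      rw [← PySem.List.mem_sorted rem (fun x => x) false]
      exact List.getElem_mem htb
    have hxcand : (PySem.List.sorted rem (fun x => x))[t] ∈ rem.filter (fun x => p < x) :=
      List.mem_filter.mpr ⟨hxrem, by simpa using hx⟩
    rcases hmin : PySem.List.min? (rem.filter (fun x => p < x)) (fun x => x) with _ | q
    · rw [(PySem.List.min?_eq_none_iff ..).mp hmin] at hxcand
      cases hxcand
    case _ =>
    have hqcand := PySem.List.min?_mem hmin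
    have hqrem : q ∈ rem := (List.mem_filter.mp hqcand).1
    have hpq : p < q := by simpa using (List.mem_filter.mp hqcand).2
    have hqmin : ∀ y ∈ rem, p < y → q ≤ y := by
      intro y hy hpy
      exact PySem.List.min?_isMin hmin y (List.mem_filter.mpr ⟨hy, by simpa using hpy⟩)
    obtain ⟨hble, hlow, hhigh⟩ := PySem.List.bisectRight_spec (PySem.List.sorted rem (fun x => x)) p
      (PySem.List.sorted_pairwise rem (fun x => x))
    obtain ⟨jq, hjq, hjqv⟩ := List.getElem_of_mem
      ((PySem.List.mem_sorted rem (fun x => x) false q).mpr hqrem)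
    have hindjq : PySem.List.bisectRight (PySem.List.sorted rem (fun x => x)) p ≤ jq := by
      by_contra hc
      have := hlow jq hjq (by omega)
      omega
    have hindlt : PySem.List.bisectRight (PySem.List.sorted rem (fun x => x)) p < (PySem.List.sorted rem (fun x => x)).length := by omega
    have hsbind : (PySem.List.sorted rem (fun x => x))[PySem.List.bisectRight (PySem.List.sorted rem (fun x => x)) p] = q := by
      have h1 : (PySem.List.sorted rem (fun x => x))[PySem.List.bisectRight (PySem.List.sorted rem (fun x => x)) p] ≤ (PySem.List.sorted rem (fun x => x))[jq] :=
        PySem.List.sorted_id_getElem_mono rem hindjq hjq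
      have h2 : p < (PySem.List.sorted rem (fun x => x))[PySem.List.bisectRight (PySem.List.sorted rem (fun x => x)) p] := hhigh _ hindlt le_rfl
      have hmemb : (PySem.List.sorted rem (fun x => x))[PySem.List.bisectRight (PySem.List.sorted rem (fun x => x)) p] ∈ rem := by
        rw [← PySem.List.mem_sorted rem (fun x => x) false]
        exact List.getElem_mem hindlt
      have h3 : q ≤ (PySem.List.sorted rem (fun x => x))[PySem.List.bisectRight (PySem.List.sorted rem (fun x => x)) p] := hqmin _ hmemb h2
      omega
    have hindt : PySem.List.bisectRight (PySem.List.sorted rem (fun x => x)) p ≤ t := by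
      by_contra hc
      have := hlow t htb (by omega)
      omega
    have heraseB : (PySem.List.sorted rem (fun x => x)).erase q = (PySem.List.sorted rem (fun x => x)).eraseIdx (PySem.List.bisectRight (PySem.List.sorted rem (fun x => x)) p) := by
      obtain ⟨k, hk, hkv, hbef, her⟩ := pvFirstIdx
        ((PySem.List.mem_sorted rem (fun x => x) false q).mpr hqrem)
      have hkind : k = PySem.List.bisectRight (PySem.List.sorted rem (fun x => x)) p := by
        rcases Nat.lt_trichotomy k (PySem.List.bisectRight (PySem.List.sorted rem (fun x => x)) p) with hlt | heq | hgt
        · have := hlow k hk hlt; omega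
        · exact heq
        · exact absurd hsbind (hbef _ hindlt hgt)
      rw [her, hkind]
    have hnext : List.Forall₂ (· < ·) (PySem.List.sorted f' (fun x => x))
        (PySem.List.sorted (rem.erase q) (fun x => x)) := by
      rw [pvSortedTail p f', heraseA, pvSortedErase hqrem, heraseB]
      exact pvExchange (PySem.List.sorted_pairwise rem (fun x => x)) h hindt ht
    obtain ⟨w', hfold, hmatch, hperm⟩ := ih (rem.erase q) (r ++ [p, q]) (out ++ [p, q]) hnext
    refine ⟨[p, q] ++ w', ?_, ?_, ?_⟩
    · rw [List.foldl_cons]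
      have hstep : pvZStep (PySem.List.sorted rem (fun x => x), r) p
          = (PySem.List.sorted (rem.erase q) (fun x => x), r ++ [p, q]) := by
        show ((PySem.List.sorted rem (fun x => x)).eraseIdx
                (PySem.List.bisectRight (PySem.List.sorted rem (fun x => x)) p),
              r ++ [p, PySem.List.pyGetD (PySem.List.sorted rem (fun x => x))
                ((PySem.List.bisectRight (PySem.List.sorted rem (fun x => x)) p : Nat) : Int) 0]) = _
        rw [pvSortedErase hqrem, heraseB, PySem.List.pyGetD_natCast, List.getD_eq_getElem?_getD,
          List.getElem?_eq_getElem hindlt]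
        simp [hsbind]
      rw [hstep, hfold]
      simp
    · show pvMatchGo (p :: f') rem out = _
      simp only [pvMatchGo, hmin, PySem.List.remove?_eq_some_erase rem q hqrem]
      rw [hmatch]
      simp
    · refine List.Perm.trans ((hperm.cons q).cons p) (List.Perm.cons p ?_)
      exact (List.perm_middle.symm.trans (List.Perm.append_left f' (List.perm_cons_erase hqrem).symm))


theorem pvFilterPerm {α : Type} (l : List α) (p q r : α → Bool)
    (hpq : ∀ x, p x = (q x || r x)) (hdisj : ∀ x, ¬(q x = true ∧ r x = true)) :
    (l.filter p).Perm (l.filter q ++ l.filter r) := by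
  induction l with
  | nil => simp
  | cons x t ih =>
    rcases hq : q x with _ | _ <;> rcases hr : r x with _ | _
    · rw [List.filter_cons_of_neg (by simp [hpq, hq, hr]),
        List.filter_cons_of_neg (by simp [hq]), List.filter_cons_of_neg (by simp [hr])]
      exact ih
    · rw [List.filter_cons_of_pos (by simp [hpq, hq, hr]),
        List.filter_cons_of_neg (by simp [hq]), List.filter_cons_of_pos (by simp [hr])]
      exact (ih.cons x).trans List.perm_middle.symm
    · rw [List.filter_cons_of_pos (by simp [hpq, hq, hr]),
        List.filter_cons_of_pos (by simp [hq]), List.filter_cons_of_neg (by simp [hr])]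
      exact ih.cons x
    · exact absurd ⟨hq, hr⟩ (hdisj x)

theorem pvZ_eq (front kids : List Int) :
    pvZ front kids
      = (front.foldl (fun st ai => pvZStep st ai)
          (PySem.List.sorted kids (fun x => x), [])).2 := by
  unfold pvZ
  rw [PySem.List.len_eq]
  exact congrArg Prod.snd (PySem.List.foldl_pyRange_zero_pyGetD' front 0 (fun st ai => pvZStep st ai) _)

theorem pvLoopNil (L : List Int) (buckets : PySem.Dict Int (List Int)) (nl : Int) (res : List Int) :
    ("YES", (L.foldl (fun (st : List Int × List Int) i =>
        let s := pvZ st.1 (buckets.getD (nl - i) [])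
        (s, st.2 ++ s)) ([], res)).2)
      = pvBGo L buckets nl [] res := by
  induction L generalizing res with
  | nil => rfl
  | cons i L ih =>
    have hz : pvZ ([] : List Int) (buckets.getD (nl - i) []) = [] := by
      rw [pvZ_eq]; rfl
    rw [List.foldl_cons]
    simp only [hz]
    have : pvMatchLevel [] (buckets.getD (nl - i) []) = some [] := rfl
    show _ = pvBGo (i :: L) buckets nl [] res
    rw [pvBGo, this]
    simpa using ih res

theorem pvLoopEq (buckets : PySem.Dict Int (List Int)) (nl : Int) (Af : Int → List Int)
    (hstep : ∀ i, 1 ≤ i → i < nl → (Af (i + 1)).Perm (Af i ++ buckets.getD (nl - i) []))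
    (hm : ∀ i, 1 ≤ i → i < nl →
      List.Forall₂ (· < ·) (PySem.List.sorted (Af i) (fun x => x))
        (PySem.List.sorted (buckets.getD (nl - i) []) (fun x => x))) :
    ∀ (k : Nat) (i₀ : Int), (nl - i₀).toNat = k → 1 ≤ i₀ → i₀ ≤ nl →
    ∀ front res, front.Perm (Af i₀) →
      ("YES", ((PySem.List.pyRange i₀ nl 1).foldl (fun (st : List Int × List Int) i =>
          let s := pvZ st.1 (buckets.getD (nl - i) [])
          (s, st.2 ++ s)) (front, res)).2)
        = pvBGo (PySem.List.pyRange i₀ nl 1) buckets nl front res := by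
  intro k
  induction k with
  | zero =>
    intro i₀ hk h1 h2 front res hfront
    rw [PySem.List.pyRange_one_eq_nil (by omega)]
    rfl
  | succ k ih =>
    intro i₀ hk h1 h2 front res hfront
    have hlt : i₀ < nl := by omega
    have hsorted : PySem.List.sorted front (fun x => x)
        = PySem.List.sorted (Af i₀) (fun x => x) :=
      PySem.List.sorted_eq_sorted_of_perm _ _ _ (fun a b h => h) hfront
    obtain ⟨w, hfold, hmatch, hperm⟩ := pvZGo front (buckets.getD (nl - i₀) []) [] []
      (by rw [hsorted]; exact hm i₀ h1 hlt)
    have hz : pvZ front (buckets.getD (nl - i₀) []) = w := by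
      rw [pvZ_eq, hfold]; rfl
    have hml : pvMatchLevel front (buckets.getD (nl - i₀) []) = some w := by
      unfold pvMatchLevel; rw [hmatch]; rfl
    rw [PySem.List.pyRange_one_cons hlt, List.foldl_cons]
    show _ = pvBGo (i₀ :: PySem.List.pyRange (i₀ + 1) nl 1) buckets nl front res
    rw [pvBGo, hml]
    simp only [hz]
    exact ih (i₀ + 1) (by omega) (by omega) (by omega) w (res ++ w)
      ((hperm.trans (hfront.append_right _)).trans (hstep i₀ h1 hlt).symm)

theorem pvPointwise_forall₂ {sa sb : List Int} (h : pvPointwiseb sa sb = true) :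
    List.Forall₂ (· < ·) sa sb := by
  unfold pvPointwiseb at h
  rw [Bool.and_eq_true] at h
  obtain ⟨hlen, hall⟩ := h
  rw [List.forall₂_iff_zip]
  refine ⟨by simpa using hlen, ?_⟩
  intro a b hmem
  simpa using List.all_eq_true.mp hall _ hmem

theorem pvAccumOne (n : Int) (xs : List Int) :
    pvAccum n xs 1 = pvBucket xs (pvNl n) := by
  unfold pvAccum pvBucket
  apply List.filter_congr
  intro v _
  rw [Bool.eq_iff_iff]
  simp only [Bool.and_eq_true, decide_eq_true_eq, beq_iff_eq]
  omega

theorem pvAccumSucc (n : Int) (xs : List Int) (i : Int) (hi : 1 ≤ i) :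
    (pvAccum n xs (i + 1)).Perm (pvAccum n xs i ++ pvBucket xs (pvNl n - i)) := by
  unfold pvAccum pvBucket
  apply pvFilterPerm
  · intro x
    rw [Bool.eq_iff_iff]
    simp only [Bool.and_eq_true, decide_eq_true_eq, Bool.or_eq_true, beq_iff_eq]
    omega
  · intro x
    simp only [Bool.and_eq_true, decide_eq_true_eq, beq_iff_eq]
    omega

-- ===== VERDICT (by name: the statement is the Claim_ definition above) =====
theorem restore_segment_tree_spec : Claim_equal_restore_segment_tree := by
  intro n xs _ hpre
  obtain ⟨hn, hpre2⟩ := hpre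
  unfold Spec_restore_segment_tree
  have hnl : ((pvBitLen n.toNat : Nat) : Int) = pvNl n := by
    rw [pvBitLen_eq]; unfold pvNl; rw [Int.toNat_of_nonneg hn]
  simp only [restore_segment_tree, restore_segment_tree_alt, pvCounter_fold,
    PySem.Dict.foldl_insert_getD_add_one_eq_counter, hnl]
  -- unify the two validity-check predicates
  rw [pvFind?_congr (PySem.List.pyRange 1 (pvNl n) 1) _
      (fun i => !(((pvBucket xs i).length : Int) == (1 : Int) <<< (pvNl n - 1 - i).toNat))
      (fun i _ => by simp only [pvCheckPredA _ _ _ (pvShift_ne_zero _), pvCount_values]),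
    pvFind?_congr (PySem.List.pyRange 1 (pvNl n) 1)
      (fun i => !((PySem.Dict.counter xs).values.foldl (fun c v => if v == i then c + 1 else c) (0 : Int)
                    == (1 : Int) <<< (pvNl n - 1 - i).toNat))
      (fun i => !(((pvBucket xs i).length : Int) == (1 : Int) <<< (pvNl n - 1 - i).toNat))
      (fun i _ => by simp only [pvCheckPredB, pvCount_values])]
  cases hfind : (PySem.List.pyRange 1 (pvNl n) 1).find?
      (fun i => !(((pvBucket xs i).length : Int) == (1 : Int) <<< (pvNl n - 1 - i).toNat)) with
  | some j => rfl
  | none =>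
  simp only []
  -- the count check passed
  have hchecks : pvChecksb n xs = true := by
    unfold pvChecksb
    rw [List.all_eq_true]
    intro i hi
    have := List.find?_eq_none.mp hfind i hi
    simpa using this
  have hsafe : pvSafeb n xs = true := by
    rw [hchecks] at hpre2
    simpa using hpre2
  unfold pvSafeb at hsafe
  rw [Bool.and_eq_true] at hsafe
  obtain ⟨hmult, hdisj⟩ := hsafe
  have hmult' : ∀ v ∈ xs, (xs.count v : Int) ≤ pvNl n + 1 := by
    intro v hv
    simpa using List.all_eq_true.mp hmult v hv
  -- the grouped levels of both ports are the buckets by multiplicity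
  have hitems : ∀ p ∈ (PySem.Dict.counter xs).items,
      0 ≤ p.2 ∧ p.2 < ((pvBitLen n.toNat + 2 : Nat) : Int) := by
    intro p hp
    rw [PySem.Dict.items_counter] at hp
    obtain ⟨k, hk, rfl⟩ := List.mem_map.mp hp
    have hkx : k ∈ xs := by
      rw [← PySem.List.dedup_eq_ofList] at hk
      exact (PySem.List.mem_dedup xs k).mp hk
    have h1 : 0 < xs.count k := List.count_pos_iff.mpr hkx
    have h2 := hmult' k hkx
    have h3 : ((pvBitLen n.toNat + 2 : Nat) : Int) = pvNl n + 2 := by push_cast [hnl]; ring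
    rw [h3]
    constructor
    · omega
    · omega
  have hbucketA : ∀ (j : Nat), (j : Int) = pvNl n ∨ (1 ≤ (j : Int) ∧ (j : Int) < pvNl n) →
      PySem.List.pyGetD ((PySem.Dict.counter xs).items.foldl
          (fun ah p => PySem.List.pySetD ah p.2 (PySem.List.pyGetD ah p.2 [] ++ [p.1]))
          (List.replicate (pvBitLen n.toNat + 2) [])) (j : Int) []
        = pvBucket xs (j : Int) := by
    intro j hj
    have hjlt : j < pvBitLen n.toNat + 2 := by
      have := hnl
      omega
    rw [pvAhFold_getD _ _ j (by simpa using hjlt) (by simpa using hitems),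
      pvGetD_replicate, pvItemsFilter]
    rfl
  have hbucketB : ∀ j : Int,
      ((PySem.Dict.counter xs).items.foldl
          (fun d p => d.insert p.2 (d.getD p.2 [] ++ [p.1])) PySem.Dict.empty).getD j []
        = pvBucket xs j := by
    intro j
    rw [pvBucketsFold_getD, PySem.Dict.getD_empty, pvItemsFilter]
    rfl
  -- replace the two level sources by the common bucket dictionary
  rw [PySem.List.foldl_congr_mem (PySem.List.pyRange 1 (pvNl n) 1) _
      (fun (st : List Int × List Int) i =>
        let s := pvZ st.1 (((PySem.Dict.counter xs).items.foldl
          (fun d p => d.insert p.2 (d.getD p.2 [] ++ [p.1])) PySem.Dict.empty).getD (pvNl n - i) [])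
        (s, st.2 ++ s)) _
      (fun st i hi => by
        have hi' := PySem.List.mem_pyRange_one.mp hi
        have hcast : (((pvNl n - i).toNat : Nat) : Int) = pvNl n - i := by omega
        simp only [hbucketB]
        rw [← hcast, hbucketA (pvNl n - i).toNat (by omega)])]
  have hfrontA : PySem.List.pyGetD ((PySem.Dict.counter xs).items.foldl
          (fun ah p => PySem.List.pySetD ah p.2 (PySem.List.pyGetD ah p.2 [] ++ [p.1]))
          (List.replicate (pvBitLen n.toNat + 2) [])) (pvNl n) []
        = pvBucket xs (pvNl n) := by
    have := hbucketA (pvBitLen n.toNat) (Or.inl hnl)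
    rwa [hnl] at this
  rw [hfrontA, hbucketB (pvNl n)]
  -- three cases: trivial size, empty root level, or the greedy runs
  rw [Bool.or_eq_true, Bool.or_eq_true, Bool.and_eq_true] at hdisj
  rcases hdisj with (h1 | h0) | ⟨hm1, hpw⟩
  · rw [PySem.List.pyRange_one_eq_nil (of_decide_eq_true h1)]
    rfl
  · have : pvBucket xs (pvNl n) = [] := List.length_eq_zero_iff.mp (by simpa using h0)
    rw [this]
    exact pvLoopNil _ _ _ _
  · have hpw' : ∀ i, 1 ≤ i → i < pvNl n →
        List.Forall₂ (· < ·) (PySem.List.sorted (pvAccum n xs i) (fun x => x))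
          (PySem.List.sorted (pvBucket xs (pvNl n - i)) (fun x => x)) := by
      intro i hi1 hi2
      apply pvPointwise_forall₂
      exact List.all_eq_true.mp hpw i (PySem.List.mem_pyRange_one.mpr ⟨hi1, hi2⟩)
    have hm1' : (pvBucket xs (pvNl n)).length = 1 := by simpa using hm1
    have hnl1 : 1 ≤ pvNl n := by
      have hne : pvBucket xs (pvNl n) ≠ [] := by
        intro h; rw [h] at hm1'; simp at hm1'
      obtain ⟨v, hv⟩ := List.exists_mem_of_ne_nil _ hne
      unfold pvBucket at hv
      obtain ⟨hvd, hvc⟩ := List.mem_filter.mp hv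
      have hveq : (xs.count v : Int) = pvNl n := by simpa using hvc
      have hvx : v ∈ xs := (PySem.List.mem_dedup xs v).mp hvd
      have := List.count_pos_iff.mpr hvx
      omega
    refine pvLoopEq _ (pvNl n) (pvAccum n xs) ?_ ?_ (pvNl n - 1).toNat 1 (by omega) le_rfl hnl1
      (pvBucket xs (pvNl n)) (pvBucket xs (pvNl n)) ?_
    · intro i hi1 hi2
      rw [hbucketB]
      exact pvAccumSucc n xs i hi1
    · intro i hi1 hi2
      rw [hbucketB]
      exact hpw' i hi1 hi2
    · rw [pvAccumOne]
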